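-- pv_equiv track=rewrite | github.com/paiml/depyler | examples/hard_functional_patterns.py | drop_while_positive
-- ===== SOURCE A (Python) =====
-- def drop_while_positive(vals: list[int]) -> list[int]:
--     """Drop elements while they are positive, return the rest."""
--     dropping: bool = True
--     result: list[int] = []
--     for v in vals:
--         if dropping and v > 0:
--             continue
--         dropping = False
--         result.append(v)
--     return result
-- ===== SOURCE B (Python) =====
-- def drop_while_positive(vals: list[int]) -> list[int]:
--     """Drop elements while they are positive, return the rest."""
--     for i, v in enumerate(vals):
--         if v <= 0:
--             return vals[i:]
--     return []
-- ===== Notes on version B (the rewrite author's own statement) =====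
-- stated objective: simpler
-- what changed: Replaces the maintained boolean flag and per-element appends with a find-the-boundary loop followed by a single bulk slice of the tail.
import Mathlib
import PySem

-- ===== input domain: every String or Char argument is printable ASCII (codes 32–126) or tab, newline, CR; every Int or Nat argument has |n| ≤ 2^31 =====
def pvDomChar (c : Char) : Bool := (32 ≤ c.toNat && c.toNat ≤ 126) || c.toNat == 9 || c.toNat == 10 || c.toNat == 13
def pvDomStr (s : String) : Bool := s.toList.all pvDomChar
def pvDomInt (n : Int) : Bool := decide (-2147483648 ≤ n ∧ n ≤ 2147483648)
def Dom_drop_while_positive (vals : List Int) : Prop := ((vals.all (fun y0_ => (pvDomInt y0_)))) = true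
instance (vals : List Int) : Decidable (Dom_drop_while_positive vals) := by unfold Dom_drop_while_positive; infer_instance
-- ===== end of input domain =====

-- B replaces A's boolean-flag-and-append loop with a find-boundary-then-tail decomposition (objective: simpler).


-- ===== PORT A =====
-- literal port of A: fold over vals with (dropping, result) state
def drop_while_positive (vals : List Int) : List Int :=
  (vals.foldl (fun (st : Bool × List Int) v =>
    if st.1 ∧ v > 0 then st
    else (false, st.2 ++ [v])) (true, [])).2

-- ===== PORT B =====
-- port of B: recursion finds the first non-positive element and returns the tail from there
def drop_while_positive_alt : List Int → List Int
  | [] => []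
  | v :: rest => if v ≤ 0 then v :: rest else drop_while_positive_alt rest

-- ===== PRECONDITION & SPEC =====
def Spec_drop_while_positive (vals : List Int) (out : List Int) : Prop := out = drop_while_positive_alt vals
instance (vals : List Int) (out : List Int) : Decidable (Spec_drop_while_positive vals out) := by unfold Spec_drop_while_positive; infer_instance

-- ===== CLAIM (what is proved, stated in full; the proofs are below) =====
def Claim_equal_drop_while_positive : Prop := ∀ (vals : List Int), Dom_drop_while_positive vals → Spec_drop_while_positive vals (drop_while_positive vals)

-- ===== LEMMAS AND PROOFS =====

-- ===== VERDICT (by name: the statement is the Claim_ definition above) =====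
-- invariant for A's fold once dropping is false: it appends the remaining list
theorem foldA_false (vs : List Int) (acc : List Int) :
    (vs.foldl (fun (st : Bool × List Int) v =>
      if st.1 ∧ v > 0 then st
      else (false, st.2 ++ [v])) (false, acc)).2 = acc ++ vs := by
  induction vs generalizing acc with
  | nil => simp
  | cons v rest ih => simp [List.foldl, ih]

theorem foldA_eq_alt (vs : List Int) :
    (vs.foldl (fun (st : Bool × List Int) v =>
      if st.1 ∧ v > 0 then st
      else (false, st.2 ++ [v])) (true, [])).2 = drop_while_positive_alt vs := by
  induction vs with
  | nil => rfl
  | cons v rest ih =>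
    by_cases h : v ≤ 0
    · have hv : ¬ v > 0 := by omega
      simp [List.foldl, drop_while_positive_alt, hv, h, foldA_false]
    · have hv : 0 < v := by omega
      simp [List.foldl, drop_while_positive_alt, hv, h, ih]

theorem drop_while_positive_spec : Claim_equal_drop_while_positive := by
  intro vals _
  unfold Spec_drop_while_positive drop_while_positive
  exact foldA_eq_alt vals
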